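-- pv_equiv track=rewrite | github.com/tsuru7/algorithm-study | AtCoder/DP-nyumon/09.py | solve
-- ===== SOURCE A (Python) =====
-- def solve(n):
--     MOD = 998244353
--     dp = [[0 for _ in range(10)] for _ in range(n+1)]
--     for i in range(1, 10):
--         dp[1][i] = 1
--     for i in range(2, n+1):
--         for j in range(1, 10):
--             if j-1 >= 0:
--                 dp[i][j] += dp[i-1][j-1]
--             dp[i][j] += dp[i-1][j]
--             if j+1 <= 9:
--                 dp[i][j] += dp[i-1][j+1]
--             dp[i][j] %= MOD
--     return sum(dp[-1]) % MOD
-- ===== SOURCE B (Python) =====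
-- def solve(n):
--     MOD = 998244353
--     # digits 1..9 (digit 0 is never used); 9x9 tridiagonal transition matrix,
--     # raised to the (n-1)-th power by binary exponentiation.
--     def mat_mul(X, Y):
--         return [[sum(X[i][k] * Y[k][j] for k in range(9)) % MOD for j in range(9)]
--                 for i in range(9)]
--     M = [[1 if abs(i - j) <= 1 else 0 for j in range(9)] for i in range(9)]
--     R = [[1 if i == j else 0 for j in range(9)] for i in range(9)]
--     e = n - 1
--     while e > 0:
--         if e & 1:
--             R = mat_mul(R, M)
--         M = mat_mul(M, M)
--         e >>= 1
--     v = [sum(R[i][k] for k in range(9)) % MOD for i in range(9)]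
--     return sum(v) % MOD
-- ===== Notes on version B (the rewrite author's own statement) =====
-- stated objective: faster
-- what changed: A fills an (n+1) x 10 DP table row by row; B raises the 9x9 tridiagonal transition matrix on digits 1..9 to the (n-1)-th power by binary exponentiation (mod 998244353) and sums the matrix applied to the all-ones vector.
import Mathlib
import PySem

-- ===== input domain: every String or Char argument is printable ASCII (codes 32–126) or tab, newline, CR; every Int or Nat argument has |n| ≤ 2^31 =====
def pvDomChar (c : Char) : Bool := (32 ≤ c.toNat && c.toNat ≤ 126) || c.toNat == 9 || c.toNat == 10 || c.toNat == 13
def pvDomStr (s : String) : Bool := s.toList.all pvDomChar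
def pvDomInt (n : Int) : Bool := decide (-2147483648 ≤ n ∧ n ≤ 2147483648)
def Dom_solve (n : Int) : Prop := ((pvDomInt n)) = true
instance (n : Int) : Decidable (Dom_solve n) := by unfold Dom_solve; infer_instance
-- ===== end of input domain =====

-- B replaces A's O(n) row-by-row DP table by binary exponentiation of the 9x9
-- transition matrix on digits 1..9 (objective: faster, O(log n) matrix steps).

-- ===== PORT A =====
-- dp[i][j] read / write (all indices used by A are nonnegative and in range under Pre_)
def pvAt (X : List (List Int)) (i j : Int) : Int :=
  PySem.List.pyGetD (PySem.List.pyGetD X i []) j 0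

def pvSet (X : List (List Int)) (i j : Int) (v : Int) : List (List Int) :=
  PySem.List.pySetD X i (PySem.List.pySetD (PySem.List.pyGetD X i []) j v)

-- body of A's inner loop over j
def aBody (dp : List (List Int)) (i j : Int) : List (List Int) :=
  let dp := if 0 ≤ j - 1 then pvSet dp i j (pvAt dp i j + pvAt dp (i-1) (j-1)) else dp
  let dp := pvSet dp i j (pvAt dp i j + pvAt dp (i-1) j)
  let dp := if j + 1 ≤ 9 then pvSet dp i j (pvAt dp i j + pvAt dp (i-1) (j+1)) else dp
  pvSet dp i j (PySem.Int.mod (pvAt dp i j) 998244353)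

-- body of A's outer loop over i
def aOuter (dp : List (List Int)) (i : Int) : List (List Int) :=
  (PySem.List.pyRange 1 10 1).foldl (fun dp j => aBody dp i j) dp

def solve (n : Int) : Int :=
  let dp : List (List Int) :=
    (PySem.List.pyRange 0 (n+1) 1).map (fun _ => (PySem.List.pyRange 0 10 1).map (fun _ => (0:Int)))
  let dp := (PySem.List.pyRange 1 10 1).foldl (fun dp i => pvSet dp 1 i 1) dp
  let dp := (PySem.List.pyRange 2 (n+1) 1).foldl aOuter dp
  PySem.Int.mod (PySem.List.pyGetD dp (-1) []).sum 998244353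

-- ===== PORT B =====
-- 9x9 matrix product mod 998244353 (entry access as in Source B's comprehensions)
def bMul (X Y : List (List Int)) : List (List Int) :=
  (PySem.List.pyRange 0 9 1).map (fun i =>
    (PySem.List.pyRange 0 9 1).map (fun j =>
      PySem.Int.mod (((PySem.List.pyRange 0 9 1).map (fun k => pvAt X i k * pvAt Y k j)).sum) 998244353))

-- the tridiagonal transition matrix M and the identity R of Source B
def bM : List (List Int) :=
  (PySem.List.pyRange 0 9 1).map (fun i =>
    (PySem.List.pyRange 0 9 1).map (fun j => if (i - j).natAbs ≤ 1 then (1:Int) else 0))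

def bI : List (List Int) :=
  (PySem.List.pyRange 0 9 1).map (fun i =>
    (PySem.List.pyRange 0 9 1).map (fun j => if i = j then (1:Int) else 0))

-- Source B's while-loop (binary exponentiation), ported with structural fuel
-- e.toNat: each pass replaces e by e >> 1, so e.toNat iterations always suffice
def bPowGo (R M : List (List Int)) (e : Int) : ℕ → List (List Int)
  | 0 => R
  | fuel+1 =>
    if 0 < e then
      bPowGo (if PySem.Int.mod e 2 = 1 then bMul R M else R) (bMul M M)
        (PySem.Int.floordiv e 2) fuel
    else R

def bPow (R M : List (List Int)) (e : Int) : List (List Int) :=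
  bPowGo R M e e.toNat

def solve_alt (n : Int) : Int :=
  let R := bPow bI bM (n - 1)
  let v := (PySem.List.pyRange 0 9 1).map (fun i =>
    PySem.Int.mod (((PySem.List.pyRange 0 9 1).map (fun k => pvAt R i k)).sum) 998244353)
  PySem.Int.mod v.sum 998244353

-- ===== PRECONDITION & SPEC =====
-- Pre_: A raises IndexError (dp[1] on a table of length n+1 ≤ 1) for every n ≤ 0.
def Pre_solve (n : Int) : Prop := 1 ≤ n
instance (n : Int) : Decidable (Pre_solve n) := by unfold Pre_solve; infer_instance

def pvWitness_solve : Int := 3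

def Spec_solve (n : Int) (out : Int) : Prop := out = solve_alt n
instance (n : Int) (out : Int) : Decidable (Spec_solve n out) := by unfold Spec_solve; infer_instance

-- ===== CLAIM (what is proved, stated in full; the proofs are below) =====
def Claim_equal_solve : Prop := ∀ (n : Int), Dom_solve n → Pre_solve n → Spec_solve n (solve n)

-- ===== LEMMAS AND PROOFS =====

-- proof-side model: rows of A's table
def zeros10 : List Int := [0,0,0,0,0,0,0,0,0,0]
def ones10  : List Int := [0,1,1,1,1,1,1,1,1,1]

-- net effect of aBody on the current row (prev row r)
def rowUpd (r : List Int) (cur : List Int) (j : Int) : List Int :=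
  cur.set j.toNat (PySem.Int.mod
    (cur.getD j.toNat 0 + r.getD (j-1).toNat 0 + r.getD j.toNat 0 +
      (if j + 1 ≤ 9 then r.getD (j+1).toNat 0 else 0)) 998244353)

def rowNext (r : List Int) : List Int :=
  (PySem.List.pyRange 1 10 1).foldl (rowUpd r) zeros10

def rowIter (k : ℕ) : List Int := rowNext^[k] ones10

-- ZMod view
def toM (X : List (List Int)) : Matrix (Fin 9) (Fin 9) (ZMod 998244353) :=
  Matrix.of fun i j => ((pvAt X ((i:ℕ):Int) ((j:ℕ):Int) : Int) : ZMod 998244353)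

def toV (r : List Int) : Fin 9 → ZMod 998244353 :=
  fun i => ((r.getD ((i:ℕ)+1) 0 : Int) : ZMod 998244353)

def onesV : Fin 9 → ZMod 998244353 := fun _ => 1

-- invariant of the outer loop after processing i = 2..m
def TblInv (n : Int) (m : ℕ) (dp : List (List Int)) : Prop :=
  dp.length = (n+1).toNat ∧ dp.getD m [] = rowIter (m-1) ∧
  (∀ k, m < k → k < dp.length → dp.getD k [] = zeros10)

theorem getD_set {α : Type} (l : List α) (i j : ℕ) (v d : α) :
    (l.set i v).getD j d = if i = j ∧ j < l.length then v else l.getD j d := by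
  simp only [List.getD_eq_getElem?_getD, List.getElem?_set]
  split_ifs with h1 h2 h3 h4 <;> simp_all

theorem pvAt_eq (i j : Int) (hi : 0 ≤ i) (hj : 0 ≤ j) (X : List (List Int)) :
    pvAt X i j = (X.getD i.toNat []).getD j.toNat 0 := by
  simp [pvAt, PySem.List.pyGetD, PySem.List.pyGet?_of_nonneg _ hi,
        PySem.List.pyGet?_of_nonneg _ hj, List.getD_eq_getElem?_getD]

theorem pvSet_eq (i j : Int) (hi : 0 ≤ i) (hj : 0 ≤ j) (X : List (List Int)) (v : Int) :
    pvSet X i j v = X.set i.toNat ((X.getD i.toNat []).set j.toNat v) := by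
  simp [pvSet, PySem.List.pySetD_of_nonneg _ _ hi, PySem.List.pySetD_of_nonneg _ _ hj,
        PySem.List.pyGetD, PySem.List.pyGet?_of_nonneg _ hi, List.getD_eq_getElem?_getD]

theorem aBody_eq (dp : List (List Int)) (i j : Int) (hi : 2 ≤ i)
    (hlen : i.toNat < dp.length) (hj1 : 1 ≤ j) (hj9 : j ≤ 9)
    (hrow : j.toNat < (dp.getD i.toNat []).length) :
    aBody dp i j =
      dp.set i.toNat (rowUpd (dp.getD (i-1).toNat []) (dp.getD i.toNat []) j) := by
  have h0i : (0:Int) ≤ i := by omega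
  have h0i1 : (0:Int) ≤ i - 1 := by omega
  have h0j : (0:Int) ≤ j := by omega
  have h0j1 : (0:Int) ≤ j - 1 := by omega
  have h0j2 : (0:Int) ≤ j + 1 := by omega
  have hne : ¬ (i.toNat = (i-1).toNat) := by omega
  unfold aBody rowUpd
  by_cases hc : j + 1 ≤ 9 <;>
    simp only [if_pos h0j1, hc, if_true, if_false, ite_true, ite_false,
      pvSet_eq i j h0i h0j, pvAt_eq i j h0i h0j, pvAt_eq (i-1) (j-1) h0i1 h0j1,
      pvAt_eq (i-1) j h0i1 h0j, pvAt_eq (i-1) (j+1) h0i1 h0j2,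
      getD_set, List.length_set, List.set_set, hlen, hrow, hne,
      and_true, and_false, true_and, false_and, if_pos, if_neg, not_false_iff,
      and_self] <;>
    simp [hlen, hrow, add_zero]

theorem rowUpd_length (r cur : List Int) (j : Int) :
    (rowUpd r cur j).length = cur.length := by
  simp [rowUpd]

theorem inner_fold (js : List Int) (dp : List (List Int)) (i : Int)
    (hjs : ∀ j ∈ js, 1 ≤ j ∧ j ≤ 9) (hi : 2 ≤ i)
    (hlen : i.toNat < dp.length) (hrow : (dp.getD i.toNat []).length = 10) :
    js.foldl (fun dp j => aBody dp i j) dp =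
      dp.set i.toNat (js.foldl (rowUpd (dp.getD (i-1).toNat [])) (dp.getD i.toNat [])) := by
  induction js generalizing dp with
  | nil =>
      simp only [List.foldl_nil]
      rw [List.getD_eq_getElem?_getD, List.getElem?_eq_getElem hlen, Option.getD_some,
          List.set_getElem_self]
  | cons j js ih =>
      have hj := hjs j (by simp)
      have hJrow : j.toNat < (dp.getD i.toNat []).length := by omega
      have hne : ¬ (i.toNat = (i-1).toNat) := by omega
      simp only [List.foldl_cons]
      have hrow' : dp[i.toNat].length = 10 := by
        rwa [List.getD_eq_getElem?_getD, List.getElem?_eq_getElem hlen] at hrow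
      have hne2 : ¬ (i.toNat = i.toNat - 1) := by omega
      rw [aBody_eq dp i j hi hlen hj.1 hj.2 hJrow]
      rw [ih _ (fun j hj => hjs j (by simp [hj])) (by simpa using hlen)
            (by simp [getD_set, hlen, rowUpd_length,
                      List.getD_eq_getElem?_getD, List.getElem?_eq_getElem hlen, hrow'])]
      simp [List.set_set, List.getElem?_set, hne2, hlen]

theorem pymod_eq_emod (a : Int) : PySem.Int.mod a 998244353 = a % 998244353 := by
  simp [PySem.Int.mod, Int.fmod_eq_emod]

theorem castmod (a : Int) :
    ((PySem.Int.mod a 998244353 : Int) : ZMod 998244353) = (a : ZMod 998244353) := by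
  rw [pymod_eq_emod, ZMod.intCast_eq_intCast_iff']
  push_cast
  rw [Int.emod_emod_of_dvd _ (by norm_num)]

theorem fmod_eq_of_cast_eq (a b : Int)
    (h : (a : ZMod 998244353) = (b : ZMod 998244353)) :
    PySem.Int.mod a 998244353 = PySem.Int.mod b 998244353 := by
  rw [pymod_eq_emod, pymod_eq_emod]
  rw [ZMod.intCast_eq_intCast_iff'] at h
  exact_mod_cast h

theorem pyR9 : PySem.List.pyRange 0 9 1 = [0,1,2,3,4,5,6,7,8] := by decide

theorem pyR110 : PySem.List.pyRange 1 10 1 = [1,2,3,4,5,6,7,8,9] := by decide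

theorem getD_map_const {α β : Type} (l : List α) (z : β) (k : ℕ) (d : β)
    (h : k < l.length) : (l.map (fun _ => z)).getD k d = z := by
  simp [List.getD_eq_getElem?_getD, List.map_const', List.getElem?_replicate, h]

theorem getD_map_lit {α : Type} (f : Int → α) (d : α) (i : ℕ) (h : i < 9) :
    (List.map f [0,1,2,3,4,5,6,7,8]).getD i d = f ((i:ℕ):Int) := by
  interval_cases i <;> rfl

theorem ones_fold (js : List Int) (dp : List (List Int))
    (hjs : ∀ j ∈ js, 0 ≤ j) (h1 : 1 < dp.length) :
    js.foldl (fun dp i => pvSet dp 1 i 1) dp =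
      dp.set 1 (js.foldl (fun r i => r.set i.toNat 1) (dp.getD 1 [])) := by
  induction js generalizing dp with
  | nil =>
      simp only [List.foldl_nil]
      rw [List.getD_eq_getElem?_getD, List.getElem?_eq_getElem h1, Option.getD_some,
          List.set_getElem_self]
  | cons j js ih =>
      have hj := hjs j (by simp)
      simp only [List.foldl_cons]
      rw [pvSet_eq 1 j (by omega) hj]
      rw [ih _ (fun j hj => hjs j (by simp [hj])) (by simpa using h1)]
      simp [getD_set, h1, List.set_set]

theorem row1_ones :
    (PySem.List.pyRange 1 10 1).foldl (fun (r : List Int) (i : Int) => r.set i.toNat 1) zeros10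
      = ones10 := by decide

theorem step_inv (n : Int) (m : ℕ) (dp : List (List Int))
    (h : TblInv n m dp) (hm : 1 ≤ m) (hmn : ((m:ℕ):Int) + 1 ≤ n) :
    TblInv n (m+1) (aOuter dp (((m:ℕ):Int)+1)) := by
  obtain ⟨hL, hR, hZ⟩ := h
  have hi : (2:Int) ≤ ((m:ℕ):Int)+1 := by push_cast; omega
  have hI : (((m:ℕ):Int)+1).toNat = m+1 := by omega
  have hlen : (((m:ℕ):Int)+1).toNat < dp.length := by
    rw [hI, hL]; omega
  have hzrow : dp.getD (m+1) [] = zeros10 := hZ (m+1) (by omega) (by rw [hL]; omega)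
  have hrow10 : (dp.getD ((((m:ℕ):Int))+1).toNat []).length = 10 := by
    rw [hI, hzrow]; rfl
  unfold aOuter
  rw [inner_fold _ _ _ (fun j hj => by
        rw [PySem.List.mem_pyRange_one] at hj; omega) hi hlen hrow10]
  have hprev : ((((m:ℕ):Int)+1) - 1).toNat = m := by omega
  rw [hI, hprev, hzrow, hR]
  have hsucc : ∀ k, rowIter (k+1) = rowNext (rowIter k) := fun k => by
    rw [rowIter, rowIter, Function.iterate_succ_apply']
  have hnext : (PySem.List.pyRange 1 10 1).foldl (rowUpd (rowIter (m-1))) zeros10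
      = rowIter m := by
    conv_rhs => rw [show m = (m-1)+1 by omega, hsucc]
    rfl
  rw [hnext]
  have hlen' : m + 1 < dp.length := by omega
  refine ⟨by simpa using hL, ?_, ?_⟩
  · rw [getD_set, if_pos ⟨rfl, hlen'⟩]
    simp
  · intro k hk hklen
    rw [getD_set]
    have : ¬ (m + 1 = k) := by omega
    simp only [this, false_and, if_false]
    exact hZ k (by omega) (by simpa using hklen)

theorem outer_inv (n : Int) (dp1 : List (List Int)) (h1 : TblInv n 1 dp1)
    (m : ℕ) (hm : 1 ≤ m) (hmn : ((m:ℕ):Int) ≤ n) :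
    TblInv n m ((PySem.List.pyRange 2 (((m:ℕ):Int)+1) 1).foldl aOuter dp1) := by
  induction m with
  | zero => omega
  | succ m ih =>
      rcases Nat.lt_or_ge m 1 with hm0 | hm1
      · have : m = 0 := by omega
        subst this
        rw [show ((((1:ℕ)):Int)+1) = 2 by norm_num, PySem.List.pyRange_one_eq_nil (by omega)]
        simpa using h1
      · have hrange : PySem.List.pyRange 2 ((((m+1:ℕ)):Int)+1) 1
            = PySem.List.pyRange 2 (((m:ℕ):Int)+1) 1 ++ [((m:ℕ):Int)+1] := by
          have := PySem.List.pyRange_one_succ_right (a := 2) (b := ((m:ℕ):Int)+1)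
            (by push_cast; omega)
          push_cast
          push_cast at this
          convert this using 2
        rw [hrange, List.foldl_append]
        simp only [List.foldl_cons, List.foldl_nil]
        exact step_inv n m _ (ih hm1 (by push_cast; push_cast at hmn; omega)) hm1
          (by push_cast; push_cast at hmn; omega)

theorem solve_char (n : Int) (hn : 1 ≤ n) :
    solve n = PySem.Int.mod (rowIter (n.toNat - 1)).sum 998244353 := by
  unfold solve
  have hz : ((PySem.List.pyRange 0 10 1).map (fun _ => (0:Int))) = zeros10 := by decide
  simp only [hz]
  have hlen0 : ((PySem.List.pyRange 0 (n+1) 1).map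
      (fun _ => zeros10)).length = (n+1).toNat := by
    simp [PySem.List.length_pyRange_one]
  have h1len : 1 < ((PySem.List.pyRange 0 (n+1) 1).map
      (fun _ => zeros10)).length := by rw [hlen0]; omega
  rw [ones_fold _ _ (fun j hj => by rw [PySem.List.mem_pyRange_one] at hj; omega) h1len]
  rw [getD_map_const _ _ _ _ (by rw [PySem.List.length_pyRange_one]; omega), row1_ones]
  set dp1 := ((PySem.List.pyRange 0 (n+1) 1).map (fun _ => zeros10)).set 1 ones10 with hdp1
  have hinv1 : TblInv n 1 dp1 := by
    refine ⟨by simp [hdp1, PySem.List.length_pyRange_one], ?_, ?_⟩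
    · rw [hdp1, getD_set, if_pos ⟨rfl, h1len⟩]
      rfl
    · intro k hk hklen
      rw [hdp1, getD_set]
      have : ¬ ((1:ℕ) = k) := by omega
      simp only [this, false_and, if_false]
      exact getD_map_const _ _ _ _ (by simpa [hdp1] using hklen)
  have hcast : ((n.toNat:ℕ):Int) = n := by omega
  have hres := outer_inv n dp1 hinv1 n.toNat (by omega) (by omega)
  rw [hcast] at hres
  obtain ⟨hL, hR, _⟩ := hres
  set dpf := (PySem.List.pyRange 2 (n+1) 1).foldl aOuter dp1 with hdpf
  have hne : dpf ≠ [] := by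
    intro hnil
    rw [hnil] at hL
    simp at hL
    omega
  rw [PySem.List.pyGetD_neg_one _ _ hne]
  rw [List.getLast_eq_getElem]
  have hlast : dpf.length - 1 = n.toNat := by omega
  have hlt : n.toNat < dpf.length := by omega
  rw [List.getD_eq_getElem?_getD, List.getElem?_eq_getElem hlt, Option.getD_some] at hR
  simp only [hlast]
  rw [hR]

theorem castemod (a : Int) :
    ((a % (998244353:Int) : Int) : ZMod 998244353) = (a : ZMod 998244353) := by
  rw [ZMod.intCast_eq_intCast_iff']
  push_cast
  rw [Int.emod_emod_of_dvd _ (by norm_num)]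

theorem toM_apply (X : List (List Int)) (i j : Fin 9) :
    toM X i j = (((X.getD (i:ℕ) []).getD (j:ℕ) 0 : Int) : ZMod 998244353) := by
  simp [toM, pvAt_eq]

theorem toM_mul (X Y : List (List Int)) : toM (bMul X Y) = toM X * toM Y := by
  ext i j
  rw [Matrix.mul_apply, toM_apply]
  unfold bMul
  rw [pyR9]
  rw [getD_map_lit _ _ _ i.isLt, getD_map_lit _ _ _ j.isLt]
  rw [castmod]
  simp only [List.map_cons, List.map_nil, List.sum_cons, List.sum_nil, add_zero]
  simp [toM_apply, pvAt_eq, Fin.sum_univ_succ] <;> push_cast <;> ring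

theorem toM_one : toM bI = 1 := by
  ext i j
  rw [toM_apply, Matrix.one_apply]
  unfold bI
  rw [pyR9, getD_map_lit _ _ _ i.isLt, getD_map_lit _ _ _ j.isLt]
  by_cases h : i = j
  · simp [h]
  · have : ¬ (((i:ℕ):Int) = ((j:ℕ):Int)) := by
      simpa [Fin.ext_iff] using h
    simp [this, h]

theorem pymod2 (e : Int) : PySem.Int.mod e 2 = e % 2 := by
  simp [PySem.Int.mod, Int.fmod_eq_emod]

theorem bPowGo_toM (f : ℕ) : ∀ (e : Int) (R M : List (List Int)), e.toNat ≤ f →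
    toM (bPowGo R M e f) = toM R * (toM M) ^ e.toNat := by
  induction f with
  | zero =>
      intro e R M hf
      rw [bPowGo, show e.toNat = 0 by omega, pow_zero, mul_one]
  | succ f ih =>
      intro e R M hf
      by_cases h : 0 < e
      · rw [bPowGo, if_pos h]
        have hdiv : PySem.Int.floordiv e 2 = e / 2 := by
          simp [PySem.Int.floordiv, Int.fdiv_eq_ediv]
        rw [hdiv] 
        rw [ih (e / 2) _ _ (by omega), toM_mul]
        have hsq : toM M * toM M = (toM M) ^ 2 := (sq (toM M)).symm
        rcases Int.emod_two_eq_zero_or_one e with hp | hp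
        · rw [if_neg (by rw [pymod2, hp]; norm_num)]
          rw [hsq, ← pow_mul, show 2 * (e/2).toNat = e.toNat from by omega]
        · have he : e.toNat = 2 * (e/2).toNat + 1 := by omega
          rw [if_pos (by rw [pymod2, hp]), toM_mul]
          rw [hsq, ← pow_mul, mul_assoc, he, pow_succ']
      · rw [bPowGo, if_neg h]
        rw [show e.toNat = 0 by omega, pow_zero, mul_one]

theorem bPow_toM (e : Int) (R M : List (List Int)) :
    toM (bPow R M e) = toM R * (toM M) ^ e.toNat :=
  bPowGo_toM e.toNat e R M le_rfl

theorem rowNext_explicit (a0 a1 a2 a3 a4 a5 a6 a7 a8 a9 : Int) :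
    rowNext [a0,a1,a2,a3,a4,a5,a6,a7,a8,a9] =
      [0,
       PySem.Int.mod (0 + a0 + a1 + a2) 998244353,
       PySem.Int.mod (0 + a1 + a2 + a3) 998244353,
       PySem.Int.mod (0 + a2 + a3 + a4) 998244353,
       PySem.Int.mod (0 + a3 + a4 + a5) 998244353,
       PySem.Int.mod (0 + a4 + a5 + a6) 998244353,
       PySem.Int.mod (0 + a5 + a6 + a7) 998244353,
       PySem.Int.mod (0 + a6 + a7 + a8) 998244353,
       PySem.Int.mod (0 + a7 + a8 + a9) 998244353,
       PySem.Int.mod (0 + a8 + a9 + 0) 998244353] := by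
  rw [rowNext, pyR110]
  rfl

theorem bMlit : bM = [[1,1,0,0,0,0,0,0,0],[1,1,1,0,0,0,0,0,0],[0,1,1,1,0,0,0,0,0],
    [0,0,1,1,1,0,0,0,0],[0,0,0,1,1,1,0,0,0],[0,0,0,0,1,1,1,0,0],[0,0,0,0,0,1,1,1,0],
    [0,0,0,0,0,0,1,1,1],[0,0,0,0,0,0,0,1,1]] := by decide

theorem rowNext_spec (r : List Int) (h10 : r.length = 10) (h0 : r.getD 0 0 = 0) :
    (rowNext r).length = 10 ∧ (rowNext r).getD 0 0 = 0 ∧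
      toV (rowNext r) = (toM bM).mulVec (toV r) := by
  rcases r with _|⟨a0,r⟩; · simp at h10
  rcases r with _|⟨a1,r⟩; · simp at h10
  rcases r with _|⟨a2,r⟩; · simp at h10
  rcases r with _|⟨a3,r⟩; · simp at h10
  rcases r with _|⟨a4,r⟩; · simp at h10
  rcases r with _|⟨a5,r⟩; · simp at h10
  rcases r with _|⟨a6,r⟩; · simp at h10
  rcases r with _|⟨a7,r⟩; · simp at h10
  rcases r with _|⟨a8,r⟩; · simp at h10
  rcases r with _|⟨a9,r⟩; · simp at h10
  rcases r with _|⟨a10,r⟩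
  case cons => exfalso; simp only [List.length_cons] at h10; omega
  have ha0 : a0 = 0 := by simpa using h0
  subst ha0
  rw [rowNext_explicit]
  refine ⟨rfl, rfl, ?_⟩
  funext i
  have hmv : (toM bM).mulVec (toV [0,a1,a2,a3,a4,a5,a6,a7,a8,a9]) i
      = ∑ k : Fin 9, toM bM i k * toV [0,a1,a2,a3,a4,a5,a6,a7,a8,a9] k := by
    rfl
  rw [hmv]
  fin_cases i <;>
    simp [toV, toM_apply, bMlit, Fin.sum_univ_succ, castemod] <;> push_cast <;> ring

theorem rowIter_spec (k : ℕ) :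
    (rowIter k).length = 10 ∧ (rowIter k).getD 0 0 = 0 ∧
    toV (rowIter k) = ((toM bM) ^ k).mulVec onesV := by
  induction k with
  | zero =>
      refine ⟨rfl, rfl, ?_⟩
      rw [pow_zero, Matrix.one_mulVec]
      funext i
      fin_cases i <;> simp [rowIter, ones10, toV, onesV]
  | succ k ih =>
      obtain ⟨h10, h0, hV⟩ := ih
      have hstep := rowNext_spec (rowIter k) h10 h0
      have hit : rowIter (k+1) = rowNext (rowIter k) := by
        rw [rowIter, Function.iterate_succ_apply']
        rfl
      refine ⟨by rw [hit]; exact hstep.1, by rw [hit]; exact hstep.2.1, ?_⟩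
      rw [hit, hstep.2.2, hV, Matrix.mulVec_mulVec, ← pow_succ']

theorem sum_cast_row (r : List Int) (h10 : r.length = 10) (h0 : r.getD 0 0 = 0) :
    ((r.sum : Int) : ZMod 998244353) = ∑ i : Fin 9, toV r i := by
  rcases r with _|⟨a0,r⟩; · simp at h10
  rcases r with _|⟨a1,r⟩; · simp at h10
  rcases r with _|⟨a2,r⟩; · simp at h10
  rcases r with _|⟨a3,r⟩; · simp at h10
  rcases r with _|⟨a4,r⟩; · simp at h10
  rcases r with _|⟨a5,r⟩; · simp at h10
  rcases r with _|⟨a6,r⟩; · simp at h10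
  rcases r with _|⟨a7,r⟩; · simp at h10
  rcases r with _|⟨a8,r⟩; · simp at h10
  rcases r with _|⟨a9,r⟩; · simp at h10
  rcases r with _|⟨a10,r⟩
  case cons => exfalso; simp only [List.length_cons] at h10; omega
  have ha0 : a0 = 0 := by simpa using h0
  subst ha0
  simp [toV, Fin.sum_univ_succ] <;> push_cast <;> ring

-- ===== VERDICT (by name: the statement is the Claim_ definition above) =====
theorem solve_spec : Claim_equal_solve := by
  intro n _ hpre
  unfold Spec_solve
  have hn : 1 ≤ n := hpre
  rw [solve_char n hn]
  unfold solve_alt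
  apply fmod_eq_of_cast_eq
  obtain ⟨h10, h0, hV⟩ := rowIter_spec (n.toNat - 1)
  rw [sum_cast_row _ h10 h0, hV]
  have hMR : toM (bPow bI bM (n-1)) = (toM bM) ^ (n.toNat - 1) := by
    rw [bPow_toM, toM_one, one_mul]
    congr 1
    omega
  rw [← hMR]
  rw [pyR9]
  simp only [List.map_cons, List.map_nil, List.sum_cons, List.sum_nil, add_zero]
  push_cast
  simp only [castmod]
  simp [Matrix.mulVec, dotProduct, onesV, Fin.sum_univ_succ, toM_apply, pvAt_eq] <;>
    push_cast <;> ring
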